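-- pv_equiv track=rewrite | github.com/mab2400/semcoder | run.py | extract_relevant_code
-- ===== SOURCE A (Python) =====
-- def extract_relevant_code(generated_code, entry_point):
--     """
--     Extracts all code leading up to and including the entry point function, stopping at the end of the entry point function.
--     """
--     # Split the code by lines
--     lines = generated_code.splitlines()
--     relevant_code = []
--     inside_function = False
--
--     for line in lines:
--         if line.startswith(f"def {entry_point}("):
--             inside_function = True
--         relevant_code.append(line)
--
--         if inside_function and line.startswith("def ") and not line.startswith(f"def {entry_point}("):
--             relevant_code.pop()
--             break
--
--     return "\n".join(relevant_code).strip()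
-- ===== SOURCE B (Python) =====
-- def extract_relevant_code(generated_code, entry_point):
--     """
--     Extracts all code leading up to and including the entry point function, stopping at the end of the entry point function.
--     """
--     lines = generated_code.splitlines()
--     prefix = f"def {entry_point}("
--     start = next((i for i, l in enumerate(lines) if l.startswith(prefix)), None)
--     if start is None:
--         return "\n".join(lines).strip()
--     for j in range(start + 1, len(lines)):
--         if lines[j].startswith("def ") and not lines[j].startswith(prefix):
--             return "\n".join(lines[:j]).strip()
--     return "\n".join(lines).strip()
-- ===== Notes on version B (the rewrite author's own statement) =====
-- stated objective: simpler
-- what changed: B computes the cut position by index arithmetic (find the first entry-def line, then the first other def line after it) and slices, instead of A's stateful accumulate-then-pop loop with a flag.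
import Mathlib
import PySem

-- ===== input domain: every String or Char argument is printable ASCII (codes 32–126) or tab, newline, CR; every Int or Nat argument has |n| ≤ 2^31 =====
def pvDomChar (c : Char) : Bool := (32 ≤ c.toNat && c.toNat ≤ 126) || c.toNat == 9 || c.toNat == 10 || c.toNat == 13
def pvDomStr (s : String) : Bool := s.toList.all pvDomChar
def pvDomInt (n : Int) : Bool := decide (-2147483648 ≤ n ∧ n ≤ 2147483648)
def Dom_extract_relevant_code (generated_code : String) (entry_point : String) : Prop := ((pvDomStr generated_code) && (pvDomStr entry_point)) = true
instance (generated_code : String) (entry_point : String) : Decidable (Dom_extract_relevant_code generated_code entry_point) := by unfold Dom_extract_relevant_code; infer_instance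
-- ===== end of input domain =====

-- B computes the cut position by index arithmetic (first entry-def line, then the first
-- other `def ` line after it) and slices, instead of A's accumulate-then-pop loop with a flag.

-- ===== PORT A =====
-- A's for-loop with `inside_function`, append, conditional pop+break, as structural recursion.
def ercLoopA (pref : String) : List String → Bool → List String
  | [], _ => []
  | l :: ls, inside =>
    let inside' := if PySem.Str.startswith l pref then true else inside
    if inside' && PySem.Str.startswith l "def " && !(PySem.Str.startswith l pref) then
      []  -- relevant_code.pop(); break  (the just-appended line is dropped)
    else
      l :: ercLoopA pref ls inside'

def extract_relevant_code (generated_code : String) (entry_point : String) : String :=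
  let lines := PySem.Str.splitlines generated_code
  PySem.Str.strip (PySem.Str.join "\n" (ercLoopA ("def " ++ entry_point ++ "(") lines false))

-- ===== PORT B =====
-- index of the first line starting with pref
def ercFindStart (pref : String) : List String → Option Nat
  | [] => none
  | l :: ls =>
    if PySem.Str.startswith l pref then some 0
    else (ercFindStart pref ls).map (· + 1)

-- offset of the first line starting with "def " but not with pref
def ercFindCut (pref : String) : List String → Option Nat
  | [] => none
  | l :: ls =>
    if PySem.Str.startswith l "def " && !(PySem.Str.startswith l pref) then some 0
    else (ercFindCut pref ls).map (· + 1)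

def extract_relevant_code_alt (generated_code : String) (entry_point : String) : String :=
  let lines := PySem.Str.splitlines generated_code
  let pref := "def " ++ entry_point ++ "("
  match ercFindStart pref lines with
  | none => PySem.Str.strip (PySem.Str.join "\n" lines)
  | some i =>
    match ercFindCut pref (lines.drop (i + 1)) with
    | none => PySem.Str.strip (PySem.Str.join "\n" lines)
    | some k => PySem.Str.strip (PySem.Str.join "\n" (lines.take (i + 1 + k)))

-- ===== PRECONDITION & SPEC =====
def Spec_extract_relevant_code (generated_code : String) (entry_point : String) (out : String) : Prop := out = extract_relevant_code_alt generated_code entry_point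
instance (generated_code : String) (entry_point : String) (out : String) : Decidable (Spec_extract_relevant_code generated_code entry_point out) := by unfold Spec_extract_relevant_code; infer_instance

-- ===== CLAIM (what is proved, stated in full; the proofs are below) =====
def Claim_equal_extract_relevant_code : Prop := ∀ (generated_code : String) (entry_point : String), Dom_extract_relevant_code generated_code entry_point → Spec_extract_relevant_code generated_code entry_point (extract_relevant_code generated_code entry_point)

-- ===== LEMMAS AND PROOFS =====

-- once inside, A keeps lines up to the first cut line
theorem ercLoopA_true (pref : String) (ls : List String) :
    ercLoopA pref ls true =
      match ercFindCut pref ls with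
      | none => ls
      | some k => ls.take k := by
  induction ls with
  | nil => simp [ercLoopA, ercFindCut]
  | cons l ls ih =>
    have hins : (if PySem.Str.startswith l pref then true else true) = true := by
      split <;> rfl
    cases hb : (PySem.Str.startswith l "def " && !(PySem.Str.startswith l pref)) with
    | true =>
      simp only [ercLoopA, ercFindCut, hins, Bool.true_and, hb, if_true]
      simp
    | false =>
      simp only [ercLoopA, ercFindCut, hins, Bool.true_and, hb, Bool.false_eq_true,
        if_false, ih]
      cases ercFindCut pref ls <;> simp

-- before the entry def is seen, lines are copied; from the entry-def line on, ercLoopA_true applies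
theorem ercLoopA_false (pref : String) (ls : List String) :
    ercLoopA pref ls false =
      match ercFindStart pref ls with
      | none => ls
      | some i =>
        match ercFindCut pref (ls.drop (i + 1)) with
        | none => ls
        | some k => ls.take (i + 1 + k) := by
  induction ls with
  | nil => simp [ercLoopA, ercFindStart]
  | cons l ls ih =>
    cases hp : PySem.Str.startswith l pref with
    | true =>
      -- entry-def line: kept, continue inside
      simp only [ercLoopA, ercFindStart, hp, if_true, Bool.not_true, Bool.and_false,
        Bool.false_eq_true, if_false, List.drop_succ_cons, List.drop_zero,
        ercLoopA_true]
      cases ercFindCut pref ls <;> simp [List.take_succ_cons, Nat.add_comm]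
    | false =>
      -- not the entry def: copied, still outside
      simp only [ercLoopA, ercFindStart, hp, Bool.false_eq_true, if_false,
        Bool.false_and, ih]
      cases hs : ercFindStart pref ls with
      | none => simp
      | some i =>
        simp only [Option.map_some, List.drop_succ_cons]
        cases ercFindCut pref (ls.drop (i + 1)) with
        | none => simp
        | some k =>
          simp only []
          have : i + 1 + 1 + k = (i + 1 + k) + 1 := by omega
          rw [this, List.take_succ_cons]

-- ===== VERDICT (by name: the statement is the Claim_ definition above) =====
theorem extract_relevant_code_spec : Claim_equal_extract_relevant_code := by
  intro g e _
  unfold Spec_extract_relevant_code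
  simp only [extract_relevant_code, extract_relevant_code_alt]
  rw [ercLoopA_false]
  cases hs : ercFindStart ("def " ++ e ++ "(") (PySem.Str.splitlines g) with
  | none => simp only [hs]
  | some i =>
    cases hc : ercFindCut ("def " ++ e ++ "(") ((PySem.Str.splitlines g).drop (i + 1)) <;>
      simp only [hs, hc]
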